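-- pv_equiv track=rewrite | github.com/TAbdiukov/rfcvoip | pyVoIP/SIPAuth.py | _ordered_algorithms
-- ===== SOURCE A (Python) =====
-- from typing import Any, Dict, Iterable, List, Optional, Sequence, Tuple, Union
--
-- SUPPORTED_DIGEST_ALGORITHMS = (
--     "SHA-512-256",
--     "SHA-512-256-sess",
--     "SHA-256",
--     "SHA-256-sess",
--     "MD5-sess",
--     "MD5",
-- )
--
-- _HASHLIB_ALGORITHMS = {
--     "MD5": "md5",
--     "SHA-256": "sha256",
--     "SHA-512-256": "sha512_256",
-- }
--
-- _ALGORITHM_ALIASES = {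
--     "MD5": "MD5",
--     "MD5-SESS": "MD5-sess",
--     "SHA-256": "SHA-256",
--     "SHA256": "SHA-256",
--     "SHA-256-SESS": "SHA-256-sess",
--     "SHA256-SESS": "SHA-256-sess",
--     "SHA-512-256": "SHA-512-256",
--     "SHA512-256": "SHA-512-256",
--     "SHA-512/256": "SHA-512-256",
--     "SHA512/256": "SHA-512-256",
--     "SHA512_256": "SHA-512-256",
--     "SHA-512-256-SESS": "SHA-512-256-sess",
--     "SHA512-256-SESS": "SHA-512-256-sess",
--     "SHA-512/256-SESS": "SHA-512-256-sess",
--     "SHA512/256-SESS": "SHA-512-256-sess",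
--     "SHA512_256-SESS": "SHA-512-256-sess",
-- }
--
-- _ALGORITHM_PREFERENCE = {
--     algorithm: index for index, algorithm in enumerate(SUPPORTED_DIGEST_ALGORITHMS)
-- }
--
-- class SIPAuthError(Exception):
--     pass
--
-- def normalize_digest_algorithm(algorithm: Optional[str]) -> str:
--     raw = str(algorithm or "MD5").strip().strip('"')
--     if not raw:
--         raw = "MD5"
--     return _ALGORITHM_ALIASES.get(raw.upper(), raw)
--
-- def _base_algorithm(algorithm: Optional[str]) -> str:
--     algorithm = normalize_digest_algorithm(algorithm)
--     if algorithm.endswith("-sess"):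
--         return algorithm[: -len("-sess")]
--     return algorithm
--
-- def _ensure_supported_algorithm(
--     algorithm: Optional[str],
--     supported_algorithms: Optional[Iterable[str]] = None,
-- ) -> str:
--     algorithm = normalize_digest_algorithm(algorithm)
--     supported = {
--         normalize_digest_algorithm(item)
--         for item in (supported_algorithms or SUPPORTED_DIGEST_ALGORITHMS)
--     }
--     if algorithm not in supported:
--         raise SIPAuthError(f"Unsupported SIP digest algorithm {algorithm!r}.")
--     if _base_algorithm(algorithm) not in _HASHLIB_ALGORITHMS:
--         raise SIPAuthError(f"Unsupported SIP digest algorithm {algorithm!r}.")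
--     return algorithm
--
-- def _ordered_algorithms(algorithms: Iterable[str]) -> List[str]:
--     normalized = []
--     for algorithm in algorithms:
--         try:
--             normalized.append(_ensure_supported_algorithm(algorithm))
--         except SIPAuthError:
--             continue
--
--     return sorted(
--         dict.fromkeys(normalized),
--         key=lambda item: _ALGORITHM_PREFERENCE.get(item, 999),
--     )
-- ===== SOURCE B (Python) =====
-- from typing import Iterable, List, Optional
--
-- SUPPORTED_DIGEST_ALGORITHMS = (
--     "SHA-512-256",
--     "SHA-512-256-sess",
--     "SHA-256",
--     "SHA-256-sess",
--     "MD5-sess",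
--     "MD5",
-- )
--
-- _ALGORITHM_ALIASES = {
--     "MD5": "MD5",
--     "MD5-SESS": "MD5-sess",
--     "SHA-256": "SHA-256",
--     "SHA256": "SHA-256",
--     "SHA-256-SESS": "SHA-256-sess",
--     "SHA256-SESS": "SHA-256-sess",
--     "SHA-512-256": "SHA-512-256",
--     "SHA512-256": "SHA-512-256",
--     "SHA-512/256": "SHA-512-256",
--     "SHA512/256": "SHA-512-256",
--     "SHA512_256": "SHA-512-256",
--     "SHA-512-256-SESS": "SHA-512-256-sess",
--     "SHA512-256-SESS": "SHA-512-256-sess",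
--     "SHA-512/256-SESS": "SHA-512-256-sess",
--     "SHA512/256-SESS": "SHA-512-256-sess",
--     "SHA512_256-SESS": "SHA-512-256-sess",
-- }
--
--
-- def _canonical(algorithm: Optional[str]) -> str:
--     raw = str(algorithm or "MD5").strip().strip('"')
--     if not raw:
--         raw = "MD5"
--     return _ALGORITHM_ALIASES.get(raw.upper(), raw)
--
--
-- def _ordered_algorithms(algorithms: Iterable[str]) -> List[str]:
--     # An input is valid exactly when its canonical name is one of the six
--     # supported entries (each of which has a hashlib base), so map once and
--     # filter the supported tuple in preference order: no exceptions, no set,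
--     # no dedup, no sort.
--     canon = [_canonical(a) for a in algorithms]
--     return [name for name in SUPPORTED_DIGEST_ALGORITHMS if name in canon]
-- ===== Notes on version B (the rewrite author's own statement) =====
-- stated objective: simpler
-- what changed: B drops A's try/except validation, dedup and sort entirely: it maps each input once to its canonical alias name and returns the SUPPORTED_DIGEST_ALGORITHMS tuple filtered by membership of the name in that mapped list, which is correct because an input passes A's validation exactly when its canonical name is one of the six supported entries.
import Mathlib
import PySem

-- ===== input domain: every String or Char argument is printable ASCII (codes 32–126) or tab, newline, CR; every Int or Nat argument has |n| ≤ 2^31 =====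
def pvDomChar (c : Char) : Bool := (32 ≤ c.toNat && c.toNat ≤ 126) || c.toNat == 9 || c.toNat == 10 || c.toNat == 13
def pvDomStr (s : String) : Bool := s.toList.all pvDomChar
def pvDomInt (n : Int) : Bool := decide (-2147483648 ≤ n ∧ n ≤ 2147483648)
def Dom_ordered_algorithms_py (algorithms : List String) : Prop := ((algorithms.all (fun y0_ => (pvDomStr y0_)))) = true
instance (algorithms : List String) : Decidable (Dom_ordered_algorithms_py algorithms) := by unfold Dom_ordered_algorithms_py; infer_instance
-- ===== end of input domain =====

-- B replaces A's try/except validation + dict.fromkeys dedup + sorted-by-preference with a single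
-- map to canonical names followed by filtering the supported tuple by membership (objective: simpler).


-- ===== PORT A =====
-- module constants shared by both Pythons (identical in Source A and Source B)
def pvSupported : List String :=
  ["SHA-512-256", "SHA-512-256-sess", "SHA-256", "SHA-256-sess", "MD5-sess", "MD5"]

def pvHashlib : PySem.Dict String String :=
  PySem.Dict.ofList [("MD5", "md5"), ("SHA-256", "sha256"), ("SHA-512-256", "sha512_256")]

def pvAliases : PySem.Dict String String :=
  PySem.Dict.ofList
    [("MD5", "MD5"), ("MD5-SESS", "MD5-sess"),
     ("SHA-256", "SHA-256"), ("SHA256", "SHA-256"),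
     ("SHA-256-SESS", "SHA-256-sess"), ("SHA256-SESS", "SHA-256-sess"),
     ("SHA-512-256", "SHA-512-256"), ("SHA512-256", "SHA-512-256"),
     ("SHA-512/256", "SHA-512-256"), ("SHA512/256", "SHA-512-256"),
     ("SHA512_256", "SHA-512-256"),
     ("SHA-512-256-SESS", "SHA-512-256-sess"), ("SHA512-256-SESS", "SHA-512-256-sess"),
     ("SHA-512/256-SESS", "SHA-512-256-sess"), ("SHA512/256-SESS", "SHA-512-256-sess"),
     ("SHA512_256-SESS", "SHA-512-256-sess")]

-- _ALGORITHM_PREFERENCE = {algorithm: index for index, algorithm in enumerate(SUPPORTED_DIGEST_ALGORITHMS)}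
def pvPreference : PySem.Dict String Int :=
  PySem.Dict.ofList ((PySem.List.enumerate pvSupported 0).map (fun p => (p.2, p.1)))

-- A's normalize_digest_algorithm
def pvNormalize (algorithm : String) : String :=
  let raw := PySem.Str.stripChars (PySem.Str.strip (if algorithm = "" then "MD5" else algorithm)) "\""
  let raw := if raw = "" then "MD5" else raw
  (pvAliases.get? (PySem.Str.upper raw)).getD raw

-- A's _base_algorithm
def pvBase (algorithm : String) : String :=
  let a := pvNormalize algorithm
  if PySem.Str.endswith a "-sess" then PySem.Str.slice a none (some (-5)) else a

-- A's _ensure_supported_algorithm called with the default supported set; none = SIPAuthError raised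
def pvEnsure (algorithm : String) : Option String :=
  let a := pvNormalize algorithm
  let supported := PySem.Set.ofList (pvSupported.map pvNormalize)
  if PySem.Set.contains supported a then
    if pvHashlib.contains (pvBase a) then some a else none
  else none

def ordered_algorithms_py (algorithms : List String) : List String :=
  let normalized := algorithms.foldl
    (fun acc algorithm => match pvEnsure algorithm with
      | some a => acc ++ [a]
      | none => acc) []
  PySem.List.sorted (PySem.List.dedup normalized)
    (fun item => pvPreference.getD item 999) false

-- ===== PORT B =====
-- Source B's _canonical (same steps as the shared normalize_digest_algorithm)
def pvCanon (algorithm : String) : String :=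
  let raw := PySem.Str.stripChars (PySem.Str.strip (if algorithm = "" then "MD5" else algorithm)) "\""
  let raw := if raw = "" then "MD5" else raw
  (pvAliases.get? (PySem.Str.upper raw)).getD raw

-- canon = [_canonical(a) for a in algorithms]; [name for name in SUPPORTED if name in canon]
def ordered_algorithms_py_alt (algorithms : List String) : List String :=
  let canon := algorithms.map pvCanon
  pvSupported.filter (fun name => canon.contains name)

-- ===== PRECONDITION & SPEC =====
def Spec_ordered_algorithms_py (algorithms : List String) (out : List String) : Prop := out = ordered_algorithms_py_alt algorithms
instance (algorithms : List String) (out : List String) : Decidable (Spec_ordered_algorithms_py algorithms out) := by unfold Spec_ordered_algorithms_py; infer_instance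

-- ===== CLAIM (what is proved, stated in full; the proofs are below) =====
def Claim_equal_ordered_algorithms_py : Prop := ∀ (algorithms : List String), Dom_ordered_algorithms_py algorithms → Spec_ordered_algorithms_py algorithms (ordered_algorithms_py algorithms)

-- ===== LEMMAS AND PROOFS =====

-- A's accumulating loop is filterMap pvEnsure
theorem pvFoldA_eq (algorithms : List String) (acc : List String) :
    algorithms.foldl
      (fun acc algorithm => match pvEnsure algorithm with
        | some a => acc ++ [a]
        | none => acc) acc = acc ++ algorithms.filterMap pvEnsure := by
  induction algorithms generalizing acc with
  | nil => simp
  | cons x xs ih =>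
    simp only [List.foldl_cons, List.filterMap_cons]
    cases h : pvEnsure x <;> simp [ih]

-- the shared normalizer fixes each of the six supported names (literal evaluations)
theorem pvN1 : pvNormalize "SHA-512-256" = "SHA-512-256" := rfl
theorem pvN2 : pvNormalize "SHA-512-256-sess" = "SHA-512-256-sess" := rfl
theorem pvN3 : pvNormalize "SHA-256" = "SHA-256" := rfl
theorem pvN4 : pvNormalize "SHA-256-sess" = "SHA-256-sess" := rfl
theorem pvN5 : pvNormalize "MD5-sess" = "MD5-sess" := rfl
theorem pvN6 : pvNormalize "MD5" = "MD5" := rfl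

theorem pvSupN : pvSupported.map pvNormalize = pvSupported := by
  simp only [pvSupported, List.map_cons, List.map_nil]
  rw [pvN1, pvN2, pvN3, pvN4, pvN5, pvN6]

theorem pvSup_ofList : PySem.Set.ofList (pvSupported.map pvNormalize) = pvSupported := by
  rw [pvSupN]; decide

-- each supported name has a hashlib base (literal evaluations)
theorem pvH1 : pvHashlib.contains (pvBase "SHA-512-256") = true := rfl
theorem pvH2 : pvHashlib.contains (pvBase "SHA-512-256-sess") = true := rfl
theorem pvH3 : pvHashlib.contains (pvBase "SHA-256") = true := rfl
theorem pvH4 : pvHashlib.contains (pvBase "SHA-256-sess") = true := rfl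
theorem pvH5 : pvHashlib.contains (pvBase "MD5-sess") = true := rfl
theorem pvH6 : pvHashlib.contains (pvBase "MD5") = true := rfl

theorem pvHashOk : ∀ n ∈ pvSupported, pvHashlib.contains (pvBase n) = true := by
  intro n hn
  simp only [pvSupported, List.mem_cons, List.not_mem_nil, or_false] at hn
  rcases hn with rfl | rfl | rfl | rfl | rfl | rfl
  exacts [pvH1, pvH2, pvH3, pvH4, pvH5, pvH6]

-- the two normalizers are definitionally the same function
theorem pvCanon_eq : pvCanon = pvNormalize := rfl

-- the validation accepts an input exactly when its canonical name is supported
theorem pvEnsure_char (alg : String) :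
    pvEnsure alg =
      if pvNormalize alg ∈ pvSupported then some (pvNormalize alg) else none := by
  simp only [pvEnsure, pvSup_ofList]
  by_cases hm : pvNormalize alg ∈ pvSupported
  · have h1 : PySem.Set.contains pvSupported (pvNormalize alg) = true :=
      (PySem.Set.contains_iff _ _).mpr hm
    rw [h1, pvHashOk _ hm, if_pos hm]
    simp
  · have h1 : PySem.Set.contains pvSupported (pvNormalize alg) = false := by
      rw [← Bool.not_eq_true]
      exact fun hc => hm ((PySem.Set.contains_iff _ _).mp hc)
    rw [h1, if_neg hm]
    simp

-- everything the validation accepts is one of the six supported names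
theorem pvEnsure_mem (alg x : String) (h : pvEnsure alg = some x) : x ∈ pvSupported := by
  rw [pvEnsure_char] at h
  split at h
  · exact Option.some.inj h ▸ ‹pvNormalize alg ∈ pvSupported›
  · simp at h

-- the core: sort-by-preference of the dedup of a list drawn from the six names
-- is exactly the supported list filtered by membership
theorem pvSorted_eq_filter (l : List String) (hl : ∀ x ∈ l, x ∈ pvSupported) :
    PySem.List.sorted (PySem.List.dedup l)
      (fun item => pvPreference.getD item 999) false
      = pvSupported.filter (fun a => l.contains a) := by
  apply PySem.List.sorted_eq_of_perm_of_pairwise_lt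
  · rw [List.perm_ext_iff_of_nodup]
    · intro x
      simp only [List.mem_filter, PySem.List.mem_dedup, List.contains_iff_mem]
      constructor
      · rintro ⟨_, hx⟩; exact hx
      · intro hx; exact ⟨hl x hx, hx⟩
    · exact List.Nodup.filter _ (by decide)
    · exact PySem.List.nodup_dedup l
  · have hp : pvSupported.Pairwise
        (fun a b => pvPreference.getD a 999 < pvPreference.getD b 999) := by decide
    exact hp.sublist List.filter_sublist

-- ===== VERDICT (by name: the statement is the Claim_ definition above) =====
theorem ordered_algorithms_py_spec : Claim_equal_ordered_algorithms_py := by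
  intro algorithms _
  unfold Spec_ordered_algorithms_py ordered_algorithms_py ordered_algorithms_py_alt
  rw [pvFoldA_eq, List.nil_append]
  rw [pvSorted_eq_filter (algorithms.filterMap pvEnsure)
    (fun x hx => by
      rcases List.mem_filterMap.mp hx with ⟨alg, _, he⟩
      exact pvEnsure_mem alg x he)]
  apply List.filter_congr
  intro a ha
  rw [Bool.eq_iff_iff]
  simp only [List.contains_iff_mem, List.mem_filterMap, List.mem_map, pvCanon_eq]
  constructor
  · rintro ⟨alg, hmem, he⟩
    rw [pvEnsure_char] at he
    split at he
    · exact ⟨alg, hmem, Option.some.inj he⟩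
    · simp at he
  · rintro ⟨alg, hmem, he⟩
    refine ⟨alg, hmem, ?_⟩
    rw [pvEnsure_char, he, if_pos (by simpa using ha)]
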